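-- pv_equiv track=rewrite | github.com/flothesof/advent_of_code2018 | Problem_15_attempt2.py | in_contact_with_enemy
-- ===== SOURCE A (Python) =====
-- FOUR_DIRS = [[1, 0], [-1, 0], [0, 1], [0, -1]]
--
-- def in_contact_with_enemy(creature, creatures):
--     t, r, c, hp = creature
--     enemies = {cr[1:3]: cr for cr in creatures if cr[0] != t}
--     adjacent_enemies = []
--     for dr, dc in FOUR_DIRS:
--         if (r + dr, c + dc) in enemies:
--             adjacent_enemies.append(enemies[(r + dr, c + dc)])
--     return len(adjacent_enemies) > 0, adjacent_enemies
-- ===== SOURCE B (Python) =====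
-- def in_contact_with_enemy(creature, creatures):
--     t, r, c, hp = creature
--     # single pass: remember the last enemy seen on each of the four neighbor cells
--     down = up = right = left = None
--     for cr in creatures:
--         if cr[0] == t:
--             continue
--         dr, dc = cr[1] - r, cr[2] - c
--         if dc == 0:
--             if dr == 1:
--                 down = cr
--             elif dr == -1:
--                 up = cr
--         elif dr == 0:
--             if dc == 1:
--                 right = cr
--             elif dc == -1:
--                 left = cr
--     adjacent_enemies = [s for s in (down, up, right, left) if s is not None]
--     return bool(adjacent_enemies), adjacent_enemies
-- ===== Notes on version B (the rewrite author's own statement) =====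
-- stated objective: alternative
-- what changed: Replaces A's build-a-position-keyed-dict-then-four-lookups with a single pass over the creature list that maintains four slot accumulators (last enemy seen on each neighbor cell) and assembles the result from the slots; no index structure and no loop over directions.
import Mathlib
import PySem

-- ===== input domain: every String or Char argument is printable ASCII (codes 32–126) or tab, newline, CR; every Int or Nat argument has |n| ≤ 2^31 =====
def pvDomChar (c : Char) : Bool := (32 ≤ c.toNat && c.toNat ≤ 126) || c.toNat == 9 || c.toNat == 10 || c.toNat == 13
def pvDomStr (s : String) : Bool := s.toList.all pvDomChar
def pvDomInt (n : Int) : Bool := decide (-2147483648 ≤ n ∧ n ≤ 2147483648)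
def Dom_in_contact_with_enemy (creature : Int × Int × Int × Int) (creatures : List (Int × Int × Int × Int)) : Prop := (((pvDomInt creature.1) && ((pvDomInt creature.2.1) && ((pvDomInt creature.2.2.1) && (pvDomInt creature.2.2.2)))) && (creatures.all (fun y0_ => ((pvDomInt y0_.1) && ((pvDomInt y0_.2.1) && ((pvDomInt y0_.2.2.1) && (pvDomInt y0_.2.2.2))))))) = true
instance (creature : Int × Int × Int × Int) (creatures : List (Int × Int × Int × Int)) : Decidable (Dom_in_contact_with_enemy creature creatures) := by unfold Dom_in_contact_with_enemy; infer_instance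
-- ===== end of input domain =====

-- B replaces A's position-keyed enemy dict and per-direction lookups with a single
-- pass over the creature list maintaining four neighbor-slot accumulators (alternative decomposition).


-- ===== PORT A =====
-- FOUR_DIRS = [[1, 0], [-1, 0], [0, 1], [0, -1]]
def pvFourDirs : List (Int × Int) := [(1, 0), (-1, 0), (0, 1), (0, -1)]

def in_contact_with_enemy (creature : Int × Int × Int × Int) (creatures : List (Int × Int × Int × Int)) : Bool × (List (Int × Int × Int × Int)) :=
  let t := creature.1
  let r := creature.2.1
  let c := creature.2.2.1
  -- enemies = {cr[1:3]: cr for cr in creatures if cr[0] != t}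
  let enemies : PySem.Dict (Int × Int) (Int × Int × Int × Int) :=
    (creatures.filter (fun cr => cr.1 != t)).foldl
      (fun d cr => d.insert (cr.2.1, cr.2.2.1) cr) PySem.Dict.empty
  -- for dr, dc in FOUR_DIRS: if key in enemies: append enemies[key]
  let adjacent_enemies :=
    pvFourDirs.foldl (fun acc dir =>
      match enemies.get? (r + dir.1, c + dir.2) with
      | some v => acc ++ [v]
      | none => acc) []
  (decide (adjacent_enemies.length > 0), adjacent_enemies)

-- ===== PORT B =====
-- one pass over creatures: state = last enemy seen on each of the four neighbor cells
def pvSlotStep (t r c : Int)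
    (s : Option (Int × Int × Int × Int) × Option (Int × Int × Int × Int) ×
         Option (Int × Int × Int × Int) × Option (Int × Int × Int × Int))
    (cr : Int × Int × Int × Int) :
    Option (Int × Int × Int × Int) × Option (Int × Int × Int × Int) ×
    Option (Int × Int × Int × Int) × Option (Int × Int × Int × Int) :=
  if cr.1 == t then s
  else
    let dr := cr.2.1 - r
    let dc := cr.2.2.1 - c
    if dc == 0 then
      if dr == 1 then (some cr, s.2.1, s.2.2.1, s.2.2.2)
      else if dr == -1 then (s.1, some cr, s.2.2.1, s.2.2.2)
      else s
    else if dr == 0 then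
      if dc == 1 then (s.1, s.2.1, some cr, s.2.2.2)
      else if dc == -1 then (s.1, s.2.1, s.2.2.1, some cr)
      else s
    else s

def in_contact_with_enemy_alt (creature : Int × Int × Int × Int) (creatures : List (Int × Int × Int × Int)) : Bool × (List (Int × Int × Int × Int)) :=
  let t := creature.1
  let r := creature.2.1
  let c := creature.2.2.1
  let s := creatures.foldl (pvSlotStep t r c) (none, none, none, none)
  let adjacent_enemies := [s.1, s.2.1, s.2.2.1, s.2.2.2].filterMap id
  (!adjacent_enemies.isEmpty, adjacent_enemies)

-- ===== PRECONDITION & SPEC =====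
def Spec_in_contact_with_enemy (creature : Int × Int × Int × Int) (creatures : List (Int × Int × Int × Int)) (out : Bool × (List (Int × Int × Int × Int))) : Prop := out = in_contact_with_enemy_alt creature creatures
instance (creature : Int × Int × Int × Int) (creatures : List (Int × Int × Int × Int)) (out : Bool × (List (Int × Int × Int × Int))) : Decidable (Spec_in_contact_with_enemy creature creatures out) := by unfold Spec_in_contact_with_enemy; infer_instance

-- ===== CLAIM (what is proved, stated in full; the proofs are below) =====
def Claim_equal_in_contact_with_enemy : Prop := ∀ (creature : Int × Int × Int × Int) (creatures : List (Int × Int × Int × Int)), Dom_in_contact_with_enemy creature creatures → Spec_in_contact_with_enemy creature creatures (in_contact_with_enemy creature creatures)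

-- ===== LEMMAS AND PROOFS =====

-- the last enemy of t in l standing at position p, continuing from acc
def pvLastAt (t : Int) (p : Int × Int) (l : List (Int × Int × Int × Int))
    (acc : Option (Int × Int × Int × Int)) : Option (Int × Int × Int × Int) :=
  l.foldl (fun found cr =>
    if cr.1 != t && ((cr.2.1, cr.2.2.1) == p) then some cr else found) acc

-- A's dict comprehension answers each position query with the LAST matching enemy.
theorem dict_get_eq_lastAt (t : Int) (p : Int × Int) :
    ∀ (l : List (Int × Int × Int × Int)) (d : PySem.Dict (Int × Int) (Int × Int × Int × Int))
      (acc : Option (Int × Int × Int × Int)), d.get? p = acc →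
    ((l.filter (fun cr => cr.1 != t)).foldl
        (fun d cr => d.insert (cr.2.1, cr.2.2.1) cr) d).get? p = pvLastAt t p l acc := by
  intro l
  induction l with
  | nil => intro d acc h; simpa [pvLastAt] using h
  | cons cr l ih =>
    intro d acc h
    by_cases hf : (cr.1 != t) = true
    · simp only [List.filter_cons, hf, if_pos, List.foldl_cons, pvLastAt] at *
      by_cases hp : (cr.2.1, cr.2.2.1) = p
      · rw [ih _ _ (by rw [← hp, PySem.Dict.get?_insert_self])]
        simp [hp]
      · rw [ih _ _ (by rw [PySem.Dict.get?_insert_of_ne d cr (fun h' => hp h'.symm), h])]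
        simp [hp]
    · have ht : cr.1 = t := by simpa [bne] using hf
      simp only [List.filter_cons, bne_self_eq_false, ht, Bool.false_eq_true, if_false]
      rw [ih _ _ h]
      simp [pvLastAt, ht]

-- one step of B's slot fold, written as four independent last-match updates
set_option maxHeartbeats 1000000 in
theorem slotStep_eq (t r c : Int)
    (u : Option (Int × Int × Int × Int) × Option (Int × Int × Int × Int) ×
         Option (Int × Int × Int × Int) × Option (Int × Int × Int × Int))
    (cr : Int × Int × Int × Int) :
    pvSlotStep t r c u cr =
      ((if cr.1 != t && ((cr.2.1, cr.2.2.1) == (r + 1, c)) then some cr else u.1),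
       (if cr.1 != t && ((cr.2.1, cr.2.2.1) == (r - 1, c)) then some cr else u.2.1),
       (if cr.1 != t && ((cr.2.1, cr.2.2.1) == (r, c + 1)) then some cr else u.2.2.1),
       (if cr.1 != t && ((cr.2.1, cr.2.2.1) == (r, c - 1)) then some cr else u.2.2.2)) := by
  obtain ⟨u0, u1, u2, u3⟩ := u
  by_cases ht : cr.1 = t
  · simp [pvSlotStep, ht]
  · simp only [pvSlotStep, beq_iff_eq, ht, if_false, bne]
    have hbt : (cr.1 == t) = false := by simp [ht]
    simp only [hbt, Bool.not_false, Bool.true_and]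
    split_ifs <;> simp_all <;> omega

-- B's single-pass slot fold computes exactly the four last-match scans.
theorem slots_eq_lastAt (t r c : Int) :
    ∀ (l : List (Int × Int × Int × Int)) (s0 s1 s2 s3 : Option (Int × Int × Int × Int)),
    l.foldl (pvSlotStep t r c) (s0, s1, s2, s3)
      = (pvLastAt t (r + 1, c) l s0, pvLastAt t (r - 1, c) l s1,
         pvLastAt t (r, c + 1) l s2, pvLastAt t (r, c - 1) l s3) := by
  intro l
  induction l with
  | nil => intro s0 s1 s2 s3; simp [pvLastAt]
  | cons cr l ih =>
    intro s0 s1 s2 s3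
    simp only [List.foldl_cons, slotStep_eq, ih, pvLastAt]

-- ===== VERDICT (by name: the statement is the Claim_ definition above) =====
set_option maxHeartbeats 1000000 in
theorem in_contact_with_enemy_spec : Claim_equal_in_contact_with_enemy := by
  intro creature creatures _
  obtain ⟨t, r, c, hp⟩ := creature
  unfold Spec_in_contact_with_enemy in_contact_with_enemy in_contact_with_enemy_alt
  simp only [pvFourDirs, List.foldl_cons, List.foldl_nil, slots_eq_lastAt]
  have g : ∀ p q : Int × Int, p = q →
      ((creatures.filter (fun cr => cr.1 != t)).foldl
          (fun d cr => d.insert (cr.2.1, cr.2.2.1) cr) PySem.Dict.empty).get? p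
        = pvLastAt t q creatures none := by
    intro p q hpq
    rw [dict_get_eq_lastAt t p creatures PySem.Dict.empty none (PySem.Dict.get?_empty _), hpq]
  have g1 := g (r + 1, c + 0) (r + 1, c) (by simp)
  have g2 := g (r + -1, c + 0) (r - 1, c) (by simp only [Prod.mk.injEq]; omega)
  have g3 := g (r + 0, c + 1) (r, c + 1) (by simp)
  have g4 := g (r + 0, c + -1) (r, c - 1) (by simp only [Prod.mk.injEq]; omega)
  simp only [g1, g2, g3, g4]
  cases pvLastAt t (r + 1, c) creatures none <;>
  cases pvLastAt t (r - 1, c) creatures none <;>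
  cases pvLastAt t (r, c + 1) creatures none <;>
  cases pvLastAt t (r, c - 1) creatures none <;>
  simp
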